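-- pv_equiv track=rewrite | github.com/ben-nathanson/CodingBatSolutions | contest1_a.py | solve
-- ===== SOURCE A (Python) =====
-- from typing import List
--
-- def solve(nums: List[int]) -> List[int]:
--     r: List[int] = []
--     running_total: int = 0
--     index: int = 0
--     while index < len(nums):
--         a = nums[index]
--         b = a * (index + 1)
--         c = b - running_total
--         r.append(c)
--         running_total += c
--         index += 1
--     return r
-- ===== SOURCE B (Python) =====
-- from typing import List
--
-- def solve(nums: List[int]) -> List[int]:
--     return [(i + 1) * nums[i] - (i * nums[i - 1] if i > 0 else 0)
--             for i in range(len(nums))]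
-- ===== Notes on version B (the rewrite author's own statement) =====
-- stated objective: simpler
-- what changed: Replaced the stateful while-loop with a running-total accumulator by a direct comprehension: the accumulator telescopes to i*nums[i-1], so each output is (i+1)*nums[i] - i*nums[i-1] computed independently.
import Mathlib
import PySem

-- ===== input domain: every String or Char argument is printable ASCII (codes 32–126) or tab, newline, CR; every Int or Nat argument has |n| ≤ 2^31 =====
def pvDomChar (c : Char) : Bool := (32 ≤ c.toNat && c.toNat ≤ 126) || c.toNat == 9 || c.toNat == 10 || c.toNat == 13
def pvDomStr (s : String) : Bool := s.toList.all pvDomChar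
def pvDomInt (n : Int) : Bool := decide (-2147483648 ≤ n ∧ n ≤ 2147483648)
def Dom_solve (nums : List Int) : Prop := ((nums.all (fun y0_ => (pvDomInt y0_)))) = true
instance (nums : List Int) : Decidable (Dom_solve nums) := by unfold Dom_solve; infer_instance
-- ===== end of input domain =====

-- B replaces A's while-loop with a running-total accumulator by a direct
-- per-index formula (the accumulator telescopes): simpler, same O(n) cost.

-- ===== PORT A =====
-- while-loop on index with state (r, running_total); step n does steps 0..n-1.
-- nums[index] is always in range (index < len), so pyGet? is some; getD 0 is exact here.
def solveGo (nums : List Int) : Nat → List Int × Int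
  | 0 => ([], 0)
  | n + 1 =>
    let st := solveGo nums n
    let a := (PySem.List.pyGet? nums ((n : Int))).getD 0
    let b := a * ((n : Int) + 1)
    let c := b - st.2
    (st.1 ++ [c], st.2 + c)

def solve (nums : List Int) : List Int := (solveGo nums nums.length).1

-- ===== PORT B =====
def solve_alt (nums : List Int) : List Int :=
  (List.range nums.length).map (fun (i : Nat) =>
    ((i : Int) + 1) * nums.getD i 0 - (if 0 < i then (i : Int) * nums.getD (i - 1) 0 else 0))

-- ===== PRECONDITION & SPEC =====
def Spec_solve (nums : List Int) (out : List Int) : Prop := out = solve_alt nums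
instance (nums : List Int) (out : List Int) : Decidable (Spec_solve nums out) := by unfold Spec_solve; infer_instance

-- ===== CLAIM (what is proved, stated in full; the proofs are below) =====
def Claim_equal_solve : Prop := ∀ (nums : List Int), Dom_solve nums → Spec_solve nums (solve nums)

-- ===== LEMMAS AND PROOFS =====

theorem solveGo_invariant (nums : List Int) (n : Nat) :
    (solveGo nums n).1 =
      (List.range n).map (fun (i : Nat) =>
        ((i : Int) + 1) * nums.getD i 0 - (if 0 < i then (i : Int) * nums.getD (i - 1) 0 else 0)) ∧
    (solveGo nums n).2 = if 0 < n then (n : Int) * nums.getD (n - 1) 0 else 0 := by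
  induction n with
  | zero => simp [solveGo]
  | succ n ih =>
    obtain ⟨ih1, ih2⟩ := ih
    constructor
    · simp only [solveGo, List.range_succ, List.map_append, List.map_cons, List.map_nil,
        ih1, ih2, PySem.List.pyGet?_natCast]
      congr 1
      rcases Nat.eq_zero_or_pos n with h | h
      · subst h; simp [List.getD]
      · simp [h, List.getD]; try ring
    · simp only [solveGo, ih2, PySem.List.pyGet?_natCast]
      rcases Nat.eq_zero_or_pos n with h | h
      · subst h; simp [List.getD]; try ring
      · simp [h, List.getD]; try ring

-- ===== VERDICT (by name: the statement is the Claim_ definition above) =====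
theorem solve_spec : Claim_equal_solve := by
  intro nums _
  unfold Spec_solve solve solve_alt
  exact (solveGo_invariant nums nums.length).1
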